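-- pv_equiv track=rewrite | github.com/Aasthaengg/IBMdataset | Python_codes/p03048/s012145538.py | solve
-- ===== SOURCE A (Python) =====
-- def solve(R, G, B, N):
--     count = 0
--     for r in range(N+1):
--         for g in range(N+1):
--             x = N - R * r - G * g
--             if x >= 0 and x % B == 0:
--                 count += 1
--     return count
-- ===== SOURCE B (Python) =====
-- def _extgcd(a, b):
--     # a, b >= 0; returns (g, x, y) with g = gcd(a, b) and x*a + y*b == g
--     if b == 0:
--         return (a, 1, 0)
--     g, x, y = _extgcd(b, a % b)
--     return (g, y, x - (a // b) * y)
--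
--
-- def _count_g(G, B, N, rem):
--     # number of g in [0, N] with G*g <= rem and (rem - G*g) % B == 0
--     if G == 0:
--         return (N + 1) if (rem >= 0 and rem % B == 0) else 0
--     d, u, _ = _extgcd(abs(G), abs(B))
--     if rem % d != 0:
--         return 0
--     if G < 0:
--         u = -u
--     t = abs(B) // d
--     g0 = (u * (rem // d)) % t
--     if G > 0:
--         lo, hi = 0, min(N, rem // G)
--     else:
--         lo, hi = max(0, -(rem // (-G))), N
--     if hi < lo:
--         return 0
--     return (hi - g0) // t - (lo - 1 - g0) // t
--
--
-- def solve(R, G, B, N):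
--     total = 0
--     for r in range(N + 1):
--         total += _count_g(G, B, N, N - R * r)
--     return total
-- ===== Notes on version B (the rewrite author's own statement) =====
-- stated objective: faster
-- what changed: B removes A's inner loop over g: for each r it counts the valid g in closed form by solving the linear congruence G*g ≡ rem (mod B) with a hand-written extended gcd and counting the arithmetic progression inside the admissible interval, so the work per r is O(log) instead of O(N).
-- outside the precondition, e.g. on solve(4, -6, 0, 1): A raises ZeroDivisionError, B returns 0
import Mathlib
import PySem

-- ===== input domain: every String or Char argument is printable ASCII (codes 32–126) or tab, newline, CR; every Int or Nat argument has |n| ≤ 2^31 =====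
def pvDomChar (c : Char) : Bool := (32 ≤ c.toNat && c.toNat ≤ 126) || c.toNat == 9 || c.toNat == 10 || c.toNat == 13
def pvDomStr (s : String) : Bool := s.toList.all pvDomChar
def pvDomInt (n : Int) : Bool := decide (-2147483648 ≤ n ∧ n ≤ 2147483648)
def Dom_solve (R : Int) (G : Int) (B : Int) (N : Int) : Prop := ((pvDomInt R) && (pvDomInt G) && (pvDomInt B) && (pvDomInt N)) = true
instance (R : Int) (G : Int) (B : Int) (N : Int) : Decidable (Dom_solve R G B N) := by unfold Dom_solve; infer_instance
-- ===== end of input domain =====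

-- B replaces A's O(N^2) double loop by an O(N·log) loop: per r it counts the valid g in closed
-- form by solving the linear congruence G*g ≡ rem (mod B) with an extended gcd.

-- ===== PORT A =====
def solve (R : Int) (G : Int) (B : Int) (N : Int) : Int :=
  (PySem.List.pyRange 0 (N + 1) 1).foldl (fun count r =>
    (PySem.List.pyRange 0 (N + 1) 1).foldl (fun count g =>
      let x := N - R * r - G * g
      if 0 ≤ x ∧ PySem.Int.mod x B = 0 then count + 1 else count) count) 0

-- ===== PORT B =====
-- termination measure for the Euclidean recursion of Source B's _extgcd
theorem pvNatAbsModLt (a b : Int) (hb : b ≠ 0) : (PySem.Int.mod a b).natAbs < b.natAbs := by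
  rcases lt_or_gt_of_ne hb with h | h
  · have := PySem.Int.mod_neg_bounds a h; omega
  · have h1 := PySem.Int.mod_nonneg a h
    have h2 := PySem.Int.mod_lt a h
    omega

def extgcd (a : Int) (b : Int) : Int × Int × Int :=
  if h : b = 0 then (a, 1, 0)
  else
    let p := extgcd b (PySem.Int.mod a b)
    (p.1, p.2.2, p.2.1 - PySem.Int.floordiv a b * p.2.2)
termination_by b.natAbs
decreasing_by exact pvNatAbsModLt a b h

-- Source B's _count_g: number of g in [0, N] with G*g ≤ rem and (rem - G*g) % B == 0
def countG (G : Int) (B : Int) (N : Int) (rem : Int) : Int :=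
  if G = 0 then
    if 0 ≤ rem ∧ PySem.Int.mod rem B = 0 then N + 1 else 0
  else
    let e := extgcd |G| |B|
    let d := e.1
    if PySem.Int.mod rem d ≠ 0 then 0
    else
      let u := if G < 0 then -e.2.1 else e.2.1
      let t := PySem.Int.floordiv |B| d
      let g0 := PySem.Int.mod (u * PySem.Int.floordiv rem d) t
      let lohi := if 0 < G then ((0 : Int), min N (PySem.Int.floordiv rem G))
                  else (max 0 (-(PySem.Int.floordiv rem (-G))), N)
      if lohi.2 < lohi.1 then 0
      else PySem.Int.floordiv (lohi.2 - g0) t - PySem.Int.floordiv (lohi.1 - 1 - g0) t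

def solve_alt (R : Int) (G : Int) (B : Int) (N : Int) : Int :=
  (PySem.List.pyRange 0 (N + 1) 1).foldl (fun total r =>
    total + countG G B N (N - R * r)) 0

-- ===== PRECONDITION & SPEC =====
-- Pre_ excludes exactly the inputs where A raises: with B = 0 and N ≥ 0 the loop body evaluates x % 0
-- and Python raises ZeroDivisionError (for N < 0 the loops are empty and A returns 0 even for B = 0).
def Pre_solve (R : Int) (G : Int) (B : Int) (N : Int) : Prop := B ≠ 0 ∨ N < 0
instance (R : Int) (G : Int) (B : Int) (N : Int) : Decidable (Pre_solve R G B N) := by unfold Pre_solve; infer_instance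
def pvWitness_solve : Int × Int × Int × Int := (2, 3, 5, 10)

def Spec_solve (R : Int) (G : Int) (B : Int) (N : Int) (out : Int) : Prop := out = solve_alt R G B N
instance (R : Int) (G : Int) (B : Int) (N : Int) (out : Int) : Decidable (Spec_solve R G B N out) := by unfold Spec_solve; infer_instance

-- ===== CLAIM (what is proved, stated in full; the proofs are below) =====
def Claim_equal_solve : Prop := ∀ (R : Int) (G : Int) (B : Int) (N : Int), Dom_solve R G B N → Pre_solve R G B N → Spec_solve R G B N (solve R G B N)

-- ===== LEMMAS AND PROOFS =====

theorem pvEdivSucc (t x : Int) (ht : 0 < t) : (x + 1) / t = x / t + (if t ∣ (x + 1) then 1 else 0) := by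
  have hne : t ≠ 0 := by omega
  have h1 := Int.mul_ediv_add_emod (x + 1) t
  rw [mul_comm t ((x + 1) / t)] at h1
  have h3 := Int.emod_nonneg (x + 1) hne
  have h4 := Int.emod_lt_of_pos (x + 1) ht
  split_ifs with h
  · have hr : (x + 1) % t = 0 := Int.emod_eq_zero_of_dvd h
    obtain ⟨q, hq⟩ : ∃ q, x = (t - 1) + (q - 1) * t := ⟨(x + 1) / t, by linarith⟩
    subst hq
    rw [show t - 1 + (q - 1) * t + 1 = 0 + q * t by ring,
      Int.add_mul_ediv_right _ _ hne, Int.add_mul_ediv_right _ _ hne, Int.zero_ediv,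
      Int.ediv_eq_zero_of_lt (by omega) (by omega)]
    omega
  · have hr : (x + 1) % t ≠ 0 := fun hc => h (Int.dvd_of_emod_eq_zero hc)
    obtain ⟨q, r, h0, hlt, hq⟩ : ∃ q r, 1 ≤ r ∧ r < t ∧ x = (r - 1) + q * t :=
      ⟨(x + 1) / t, (x + 1) % t, by omega, h4, by linarith⟩
    subst hq
    rw [show r - 1 + q * t + 1 = r + q * t by ring,
      Int.add_mul_ediv_right _ _ hne, Int.add_mul_ediv_right _ _ hne,
      Int.ediv_eq_zero_of_lt (by omega) (by omega), Int.ediv_eq_zero_of_lt (by omega) (by omega)]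
    omega

theorem pvExtgcdSpec : ∀ (n : Nat) (a b : Int), b.natAbs ≤ n → 0 ≤ a → 0 ≤ b →
    (extgcd a b).1 = (Int.gcd a b : Int) ∧
    (extgcd a b).2.1 * a + (extgcd a b).2.2 * b = (Int.gcd a b : Int) := by
  intro n
  induction n with
  | zero =>
    intro a b hn ha hb
    have hb0 : b = 0 := by omega
    subst hb0
    rw [extgcd]
    simp [abs_of_nonneg ha]
  | succ n ih =>
    intro a b hn ha hb
    by_cases hb0 : b = 0
    · subst hb0
      rw [extgcd]
      simp [abs_of_nonneg ha]
    · have hbpos : 0 < b := by omega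
      have hmod : PySem.Int.mod a b = a % b := PySem.Int.mod_eq_emod_of_pos hbpos
      have hfd : PySem.Int.floordiv a b = a / b := PySem.Int.floordiv_eq_ediv_of_pos hbpos
      have h3 := Int.emod_nonneg a hb0
      have h4 := Int.emod_lt_of_pos a hbpos
      have hrec := ih b (a % b) (by omega) (by omega) (by omega)
      have hgcd : Int.gcd b (a % b) = Int.gcd a b := by
        rw [Int.emod_def, Int.gcd_sub_mul_left_right b a (a / b), Int.gcd_comm]
      rw [hgcd] at hrec
      rw [extgcd]
      simp only [hb0, dite_false]
      rw [hmod, hfd]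
      obtain ⟨h1r, h2r⟩ := hrec
      refine ⟨h1r, ?_⟩
      set x := (extgcd b (a % b)).2.1 with hx
      set y := (extgcd b (a % b)).2.2 with hy
      rw [Int.emod_def] at h2r
      linear_combination h2r

theorem pvCountWindow (t g0 lo : Int) (ht : 0 < t) : ∀ n : Nat,
    (((PySem.List.pyRange lo (lo + n) 1).countP (fun g => decide (t ∣ (g - g0)))) : Int)
      = (lo + n - 1 - g0) / t - (lo - 1 - g0) / t := by
  intro n
  induction n with
  | zero =>
    rw [show (lo + (0 : Nat) : Int) = lo by push_cast; ring,
      PySem.List.pyRange_one_eq_nil (le_refl lo)]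
    simp
  | succ n ih =>
    rw [show (lo + ((n + 1 : Nat)) : Int) = (lo + n) + 1 by push_cast; ring,
      PySem.List.pyRange_one_succ_right (by omega : lo ≤ lo + n)]
    rw [List.countP_append]
    have hstep := pvEdivSucc t (lo + n - 1 - g0) ht
    have harg : lo + n - 1 - g0 + 1 = lo + n - g0 := by ring
    rw [harg] at hstep
    by_cases hdvd : t ∣ (lo + n - g0)
    · simp only [hdvd, if_pos] at hstep
      simp [List.countP_cons, hdvd]
      push_cast
      omega
    · simp only [hdvd, if_neg, not_false_iff] at hstep
      simp [List.countP_cons, hdvd]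
      push_cast
      omega

theorem pvCongKey (G B rem d u t g0 : Int)
    (hB : B ≠ 0)
    (hdpos : 0 < d)
    (hgcd : (Int.gcd G B : Int) = d)
    (hdg : d ∣ G) (hdB : d ∣ |B|)
    (hbez : ∃ v, u * G + v * |B| = d)
    (ht : |B| = d * t)
    (hdr : d ∣ rem)
    (hg0 : t ∣ (g0 - u * (rem / d)))
    (g : Int) : B ∣ (rem - G * g) ↔ t ∣ (g - g0) := by
  have htpos : 0 < t := by
    rcases lt_trichotomy t 0 with h | h | h
    · nlinarith [abs_pos.mpr hB]
    · simp [h] at ht; omega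
    · exact h
  obtain ⟨G1, hG1⟩ := hdg
  obtain ⟨v, hv⟩ := hbez
  obtain ⟨rm, hrm⟩ := hdr
  have hremd : rem / d = rm := by rw [hrm, Int.mul_ediv_cancel_left _ (by omega : d ≠ 0)]
  -- coprimality of G1 and t
  have hcop : Int.gcd t G1 = 1 := by
    have h1 : Int.gcd G B = d.natAbs := by
      have := hgcd; omega
    have h2 : G.natAbs = d.natAbs * G1.natAbs := by
      rw [hG1, Int.natAbs_mul]
    have h3 : B.natAbs = d.natAbs * t.natAbs := by
      have : |B|.natAbs = (d * t).natAbs := by rw [ht]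
      simpa [Int.natAbs_mul, Int.natAbs_abs] using this
    have hdn : 0 < d.natAbs := by omega
    have hco : Nat.Coprime (G.natAbs / Int.gcd G B) (B.natAbs / Int.gcd G B) :=
      Nat.coprime_div_gcd_div_gcd (Int.gcd_pos_iff.mpr (Or.inr hB))
    rw [h1] at hco
    rw [h2, h3, Nat.mul_div_cancel_left _ hdn, Nat.mul_div_cancel_left _ hdn] at hco
    exact hco.symm
  -- |B| divides rem - G * g0
  obtain ⟨k, hk⟩ := hg0
  have hmain : |B| ∣ (rem - G * g0) := by
    have hexp : rem - G * g0 = v * |B| * rm - G1 * |B| * k := by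
      have hgg : G * g0 = G * (u * rm) + G * (t * k) := by
        rw [hremd] at hk; linear_combination G * hk
      have hug : G * (u * rm) = (d - v * |B|) * rm := by
        have : u * G = d - v * |B| := by linarith
        linear_combination rm * this
      have hgt : G * (t * k) = G1 * |B| * k := by
        rw [hG1, ht]; ring
      rw [hgg, hug, hgt, hrm]; ring
    exact ⟨v * rm - G1 * k, by linarith [hexp]⟩
  constructor
  · intro hdl
    have hdl' : |B| ∣ (rem - G * g) := (abs_dvd B _).mpr hdl
    have hdiff : |B| ∣ (G * (g - g0)) := by
      have : G * (g - g0) = (rem - G * g0) - (rem - G * g) := by ring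
      rw [this]; exact dvd_sub hmain hdl'
    rw [ht, hG1] at hdiff
    have h2 : t ∣ (G1 * (g - g0)) := by
      have : d * t ∣ d * (G1 * (g - g0)) := by
        rw [show d * (G1 * (g - g0)) = d * G1 * (g - g0) by ring]; exact hdiff
      exact (mul_dvd_mul_iff_left (by omega : d ≠ 0)).mp this
    exact Int.dvd_of_dvd_mul_right_of_gcd_one h2 hcop
  · intro hdl
    have h1 : |B| ∣ (G * (g - g0)) := by
      obtain ⟨m, hm⟩ := hdl
      exact ⟨G1 * m, by rw [ht, hG1, hm]; ring⟩
    have h2 : |B| ∣ (rem - G * g) := by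
      have : rem - G * g = (rem - G * g0) - G * (g - g0) := by ring
      rw [this]; exact dvd_sub hmain h1
    exact (abs_dvd B _).mp h2

theorem pvInner (G B N rem : Int) (hB : B ≠ 0) (hN : 0 ≤ N) :
    (((PySem.List.pyRange 0 (N + 1) 1).countP
      (fun g => decide (0 ≤ rem - G * g ∧ PySem.Int.mod (rem - G * g) B = 0))) : Int)
      = countG G B N rem := by
  have hpred : ∀ g : Int,
      (decide (0 ≤ rem - G * g ∧ PySem.Int.mod (rem - G * g) B = 0))
        = decide (0 ≤ rem - G * g ∧ B ∣ (rem - G * g)) := by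
    intro g
    simp [PySem.Int.mod_eq_zero_iff_dvd]
  rw [show (fun g : Int => decide (0 ≤ rem - G * g ∧ PySem.Int.mod (rem - G * g) B = 0))
      = (fun g : Int => decide (0 ≤ rem - G * g ∧ B ∣ (rem - G * g))) from funext hpred]
  by_cases hG0 : G = 0
  · subst hG0
    have hcg : countG 0 B N rem = if 0 ≤ rem ∧ PySem.Int.mod rem B = 0 then N + 1 else 0 := by
      rw [countG, if_pos rfl]
    rw [hcg]
    by_cases hc : 0 ≤ rem ∧ B ∣ rem
    · rw [if_pos (show 0 ≤ rem ∧ PySem.Int.mod rem B = 0 from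
        ⟨hc.1, (PySem.Int.mod_eq_zero_iff_dvd rem B).mpr hc.2⟩)]
      rw [List.countP_eq_length.mpr (by intro g _; simpa using hc)]
      rw [PySem.List.length_pyRange_one]
      omega
    · rw [if_neg (show ¬(0 ≤ rem ∧ PySem.Int.mod rem B = 0) from by
        rw [PySem.Int.mod_eq_zero_iff_dvd]; exact hc)]
      rw [List.countP_eq_zero.mpr (by intro g _; simpa using hc)]
      rfl
  · -- G ≠ 0
    have hspec := pvExtgcdSpec (|B|).natAbs |G| |B| le_rfl (abs_nonneg G) (abs_nonneg B)
    set e := extgcd |G| |B| with he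
    set d := e.1 with hdd
    have hgcd : d = (Int.gcd G B : Int) := by
      rw [hspec.1]
      norm_num [Int.gcd, Int.natAbs_abs]
    have hdpos : 0 < d := by
      rw [hgcd]
      exact_mod_cast Int.gcd_pos_iff.mpr (Or.inr hB)
    have hdg : d ∣ G := hgcd ▸ Int.gcd_dvd_left G B
    have hdBabs : d ∣ |B| := (dvd_abs d B).mpr (hgcd ▸ Int.gcd_dvd_right G B)
    have hdB : d ∣ B := (dvd_abs d B).mp hdBabs
    set u : Int := if G < 0 then -e.2.1 else e.2.1 with hu
    have hbez : ∃ v, u * G + v * |B| = d := by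
      refine ⟨e.2.2, ?_⟩
      have h2 := hspec.2
      rw [hu]
      by_cases hgn : G < 0
      · rw [if_pos hgn, abs_of_neg hgn] at *
        linarith [h2]
      · rw [if_neg hgn, abs_of_nonneg (by omega : (0:Int) ≤ G)] at *
        linarith [h2]
    set t := PySem.Int.floordiv |B| d with htdef
    have htediv : t = |B| / d := PySem.Int.floordiv_eq_ediv_of_pos hdpos
    have ht : |B| = d * t := by rw [htediv]; exact (Int.mul_ediv_cancel' hdBabs).symm
    have htpos : 0 < t := by nlinarith [abs_pos.mpr hB]
    set g0 := PySem.Int.mod (u * PySem.Int.floordiv rem d) t with hg0def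
    have hg0b1 : 0 ≤ g0 := PySem.Int.mod_nonneg _ htpos
    have hg0b2 : g0 < t := PySem.Int.mod_lt _ htpos
    have hremd : PySem.Int.floordiv rem d = rem / d := PySem.Int.floordiv_eq_ediv_of_pos hdpos
    have hg0 : t ∣ (g0 - u * (rem / d)) := by
      have hfm := PySem.Int.floordiv_mul_add_mod (u * PySem.Int.floordiv rem d) t
      refine ⟨-(PySem.Int.floordiv (u * PySem.Int.floordiv rem d) t), ?_⟩
      rw [hg0def, ← hremd]
      linarith [hfm]
    by_cases hdr : d ∣ rem
    · -- solvable congruence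
      have hiff : ∀ g : Int, B ∣ (rem - G * g) ↔ t ∣ (g - g0) :=
        pvCongKey G B rem d u t g0 hB hdpos hgcd.symm hdg hdBabs hbez ht hdr hg0
      have hcgE : countG G B N rem =
          (if 0 < G then
            (if min N (PySem.Int.floordiv rem G) < 0 then 0
             else PySem.Int.floordiv (min N (PySem.Int.floordiv rem G) - g0) t
                  - PySem.Int.floordiv (0 - 1 - g0) t)
           else
            (if N < max 0 (-(PySem.Int.floordiv rem (-G))) then 0
             else PySem.Int.floordiv (N - g0) t
                  - PySem.Int.floordiv (max 0 (-(PySem.Int.floordiv rem (-G))) - 1 - g0) t)) := by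
        rw [countG]
        rw [if_neg hG0]
        rw [if_neg (show ¬(PySem.Int.mod rem d ≠ 0) from by
          rw [ne_eq, PySem.Int.mod_eq_zero_iff_dvd]; exact not_not.mpr hdr)]
        by_cases hgp : 0 < G
        · simp only [if_pos hgp]
          rfl
        · simp only [if_neg hgp]
          rfl
      rw [hcgE]
      rw [show (fun g : Int => decide (0 ≤ rem - G * g ∧ B ∣ (rem - G * g)))
          = (fun g : Int => decide (0 ≤ rem - G * g ∧ t ∣ (g - g0))) from
        funext fun g => by simp [hiff g]]
      by_cases hgp : 0 < G
      · rw [if_pos hgp]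
        set q := PySem.Int.floordiv rem G with hq
        have hbr : ∀ g : Int, 0 ≤ rem - G * g ↔ g ≤ q := by
          intro g
          have h := PySem.Int.le_floordiv_iff_mul_le (q := g) (a := rem) (b := G) hgp
          have hgg : g * G = G * g := by ring
          constructor
          · intro hx; exact h.mpr (by omega)
          · intro hx; have := h.mp hx; omega
        by_cases hhi : min N q < 0
        · rw [if_pos hhi]
          rw [List.countP_eq_zero.mpr ?_]
          · rfl
          · intro g hmem
            rw [PySem.List.mem_pyRange_one] at hmem
            simp only [decide_eq_true_eq, not_and]
            intro h1 _
            have := (hbr g).mp h1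
            omega
        · rw [if_neg hhi]
          push_neg at hhi
          have hsplit := PySem.List.pyRange_one_append 0 (min N q + 1) (N + 1)
            (by omega) (by omega)
          rw [hsplit, List.countP_append]
          have h2z : List.countP
              (fun g : Int => decide (0 ≤ rem - G * g ∧ t ∣ (g - g0)))
              (PySem.List.pyRange (min N q + 1) (N + 1) 1) = 0 := by
            rw [List.countP_eq_zero]
            intro g hmem
            rw [PySem.List.mem_pyRange_one] at hmem
            simp only [decide_eq_true_eq, not_and]
            intro h1 _
            have := (hbr g).mp h1
            omega
          have hcongr := List.countP_congr
            (l := PySem.List.pyRange 0 (min N q + 1) 1)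
            (p := fun g : Int => decide (0 ≤ rem - G * g ∧ t ∣ (g - g0)))
            (q := fun g : Int => decide (t ∣ (g - g0)))
            (by
              intro g hmem
              rw [PySem.List.mem_pyRange_one] at hmem
              simp only [decide_eq_true_eq]
              constructor
              · exact fun hx => hx.2
              · exact fun hx => ⟨(hbr g).mpr (by omega), hx⟩)
          rw [hcongr, h2z]
          have hw := pvCountWindow t g0 0 htpos (min N q + 1).toNat
          rw [show ((0:Int) + ((min N q + 1).toNat : Int)) = min N q + 1 by omega] at hw
          rw [show ((min N q : Int) + 1 - 1 - g0) = min N q - g0 by ring] at hw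
          rw [add_zero, hw,
            PySem.Int.floordiv_eq_ediv_of_pos (a := min N q - g0) htpos,
            PySem.Int.floordiv_eq_ediv_of_pos (a := 0 - 1 - g0) htpos]
      · rw [if_neg hgp]
        have hgn : G < 0 := by omega
        set l0 := -(PySem.Int.floordiv rem (-G)) with hl0
        have hbr : ∀ g : Int, 0 ≤ rem - G * g ↔ l0 ≤ g := by
          intro g
          have h := PySem.Int.le_floordiv_iff_mul_le (q := -g) (a := rem) (b := -G)
            (by omega)
          have hgg : -g * -G = G * g := by ring
          constructor
          · intro hx
            have := h.mpr (by omega)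
            omega
          · intro hx
            have := h.mp (by omega)
            omega
        by_cases hlo : N < max 0 l0
        · rw [if_pos hlo]
          rw [List.countP_eq_zero.mpr ?_]
          · rfl
          · intro g hmem
            rw [PySem.List.mem_pyRange_one] at hmem
            simp only [decide_eq_true_eq, not_and]
            intro h1 _
            have := (hbr g).mp h1
            omega
        · rw [if_neg hlo]
          push_neg at hlo
          have hsplit := PySem.List.pyRange_one_append 0 (max 0 l0) (N + 1)
            (by omega) (by omega)
          rw [hsplit, List.countP_append]
          have h1z : List.countP
              (fun g : Int => decide (0 ≤ rem - G * g ∧ t ∣ (g - g0)))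
              (PySem.List.pyRange 0 (max 0 l0) 1) = 0 := by
            rw [List.countP_eq_zero]
            intro g hmem
            rw [PySem.List.mem_pyRange_one] at hmem
            simp only [decide_eq_true_eq, not_and]
            intro h1 _
            have := (hbr g).mp h1
            omega
          have hcongr := List.countP_congr
            (l := PySem.List.pyRange (max 0 l0) (N + 1) 1)
            (p := fun g : Int => decide (0 ≤ rem - G * g ∧ t ∣ (g - g0)))
            (q := fun g : Int => decide (t ∣ (g - g0)))
            (by
              intro g hmem
              rw [PySem.List.mem_pyRange_one] at hmem
              simp only [decide_eq_true_eq]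
              constructor
              · exact fun hx => hx.2
              · exact fun hx => ⟨(hbr g).mpr (by omega), hx⟩)
          rw [hcongr, h1z]
          rw [Nat.zero_add]
          have hw := pvCountWindow t g0 (max 0 l0) htpos (N + 1 - max 0 l0).toNat
          rw [show ((max 0 l0 : Int) + ((N + 1 - max 0 l0).toNat : Int)) = N + 1 by omega] at hw
          rw [show ((N : Int) + 1 - 1 - g0) = N - g0 by ring] at hw
          rw [hw,
            PySem.Int.floordiv_eq_ediv_of_pos (a := N - g0) htpos,
            PySem.Int.floordiv_eq_ediv_of_pos (a := max 0 l0 - 1 - g0) htpos]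
    · -- no solution: both sides 0
      rw [countG, if_neg hG0,
        if_pos (show (PySem.Int.mod rem (extgcd |G| |B|).1 ≠ 0) from by
          rw [ne_eq, PySem.Int.mod_eq_zero_iff_dvd]; exact hdr)]
      rw [List.countP_eq_zero.mpr ?_]
      · rfl
      · intro g _
        simp only [decide_eq_true_eq, not_and]
        intro _ hdvd
        exact absurd (by
          have h1 : d ∣ (rem - G * g) := dvd_trans hdB hdvd
          have h2 : d ∣ G * g := Dvd.dvd.mul_right hdg g
          have : rem = (rem - G * g) + G * g := by ring
          rw [this]; exact dvd_add h1 h2) hdr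

theorem solve_spec' (R G B N : Int) (hpre : Pre_solve R G B N) :
    solve R G B N = solve_alt R G B N := by
  by_cases hN : N < 0
  · have hnil : PySem.List.pyRange 0 (N + 1) 1 = [] :=
      PySem.List.pyRange_one_eq_nil (by omega)
    rw [solve, solve_alt, hnil]
    rfl
  · have hN' : 0 ≤ N := by omega
    have hB : B ≠ 0 := hpre.resolve_right hN
    rw [solve, solve_alt]
    refine PySem.List.foldl_congr_mem _ _ _ _ ?_
    intro acc r _
    have hfold := PySem.List.foldl_ite_add_one
      (l := PySem.List.pyRange 0 (N + 1) 1)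
      (p := fun g : Int => 0 ≤ N - R * r - G * g ∧ PySem.Int.mod (N - R * r - G * g) B = 0)
      (a := acc)
    rw [show (fun (count : Int) (g : Int) =>
        let x := N - R * r - G * g
        if 0 ≤ x ∧ PySem.Int.mod x B = 0 then count + 1 else count)
      = (fun (count : Int) (g : Int) =>
        if 0 ≤ N - R * r - G * g ∧ PySem.Int.mod (N - R * r - G * g) B = 0
        then count + 1 else count) from rfl]
    rw [hfold]
    rw [pvInner G B N (N - R * r) hB hN']

-- ===== VERDICT (by name: the statement is the Claim_ definition above) =====
theorem solve_spec : Claim_equal_solve := by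
  intro R G B N _ hpre
  exact solve_spec' R G B N hpre
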